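-- pv_equiv track=rewrite | github.com/iannil/one-data-studio | services/data-api/src/ai_cleaning_advisor.py | _find_similar_values
-- ===== SOURCE A (Python) =====
-- from typing import Any, Dict, List, Optional, Tuple
--
-- def _find_similar_values(value_distribution: Dict[str, int]) -> List[Dict[str, str]]:
--     """查找相似值并建议映射"""
--     mappings = []
--     values = list(value_distribution.keys())
--
--     # 简单的相似性检测（大小写、空格差异）
--     for i, v1 in enumerate(values):
--         if not isinstance(v1, str):
--             continue
--         for v2 in values[i+1:]:
--             if not isinstance(v2, str):
--                 continue
--             # 检查是否仅大小写不同
--             if v1.lower() == v2.lower() and v1 != v2: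
--                 # 选择出现次数多的作为标准
--                 standard = v1 if value_distribution[v1] >= value_distribution[v2] else v2
--                 non_standard = v2 if standard == v1 else v1
--                 mappings.append({"from": non_standard, "to": standard})
--             # 检查是否仅空格差异
--             elif v1.strip() == v2.strip() and v1 != v2:
--                 standard = v1.strip()
--                 mappings.append({"from": v1, "to": standard})
--                 mappings.append({"from": v2, "to": standard})
--
--     return mappings
-- ===== SOURCE B (Python) =====
-- from typing import Dict, List
--
--
-- def _find_similar_values(value_distribution: Dict[str, int]) -> List[Dict[str, str]]:
--     values = list(value_distribution.keys())
--     # bucket indices by lowercased and by stripped key (one pass each value)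
--     lower_groups: Dict[str, List[int]] = {}
--     strip_groups: Dict[str, List[int]] = {}
--     for i, v in enumerate(values):
--         lk = v.lower()
--         sk = v.strip()
--         lower_groups[lk] = lower_groups.get(lk, []) + [i]
--         strip_groups[sk] = strip_groups.get(sk, []) + [i]
--     mappings = []
--     for i, v1 in enumerate(values):
--         lk = v1.lower()
--         case_js = [j for j in lower_groups[lk] if j > i]
--         space_js = [j for j in strip_groups[v1.strip()]
--                     if j > i and values[j].lower() != lk]
--         for j in sorted(case_js + space_js):
--             v2 = values[j]
--             if v2.lower() == lk:
--                 standard = v1 if value_distribution[v1] >= value_distribution[v2] else v2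
--                 non_standard = v2 if standard == v1 else v1
--                 mappings.append({"from": non_standard, "to": standard})
--             else:
--                 standard = v1.strip()
--                 mappings.append({"from": v1, "to": standard})
--                 mappings.append({"from": v2, "to": standard})
--     return mappings
-- ===== Notes on version B (the rewrite author's own statement) =====
-- stated objective: faster
-- what changed: B replaces A's all-pairs O(n^2) scan by one-pass hash buckets of the keys under lower() and strip(), then emits each index's merged matching partners in ascending order, so only actually-matching pairs (plus bucket members) are touched.
import Mathlib
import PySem

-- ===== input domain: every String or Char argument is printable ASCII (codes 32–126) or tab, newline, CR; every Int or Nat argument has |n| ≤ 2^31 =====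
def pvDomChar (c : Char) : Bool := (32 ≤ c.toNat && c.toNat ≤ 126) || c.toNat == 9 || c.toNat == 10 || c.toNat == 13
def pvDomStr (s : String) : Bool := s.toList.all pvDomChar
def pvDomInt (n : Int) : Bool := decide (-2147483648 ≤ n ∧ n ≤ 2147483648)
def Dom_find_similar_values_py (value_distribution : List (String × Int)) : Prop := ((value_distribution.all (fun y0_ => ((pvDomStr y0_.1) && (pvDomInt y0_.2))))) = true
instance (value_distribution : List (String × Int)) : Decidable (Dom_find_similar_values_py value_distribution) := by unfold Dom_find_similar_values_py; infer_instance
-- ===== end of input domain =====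

-- B buckets the keys by lower()/strip() in one pass and emits each index's matches in
-- ascending partner order, replacing A's all-pairs scan (objective: faster on inputs
-- with few matching pairs; same output, proved equal).

-- ===== PORT A =====
-- literal transliteration of A's pairwise double loop
def find_similar_values_py (value_distribution : List (String × Int)) : List (List (String × String)) :=
  let d := PySem.Dict.ofList value_distribution
  let values := d.keys
  (PySem.List.enumerate values).foldl (fun mappings iv =>
    let v1 := iv.2
    (PySem.List.slice values (some (iv.1 + 1)) none).foldl (fun mappings v2 =>
      if PySem.Str.lower v1 == PySem.Str.lower v2 && v1 != v2 then
        let standard := if d.getD v1 0 ≥ d.getD v2 0 then v1 else v2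
        let non_standard := if standard == v1 then v2 else v1
        mappings ++ [[("from", non_standard), ("to", standard)]]
      else if PySem.Str.strip v1 == PySem.Str.strip v2 && v1 != v2 then
        let standard := PySem.Str.strip v1
        mappings ++ [[("from", v1), ("to", standard)], [("from", v2), ("to", standard)]]
      else mappings) mappings) []

-- ===== PORT B =====
-- literal transliteration of Source B: bucket indices by lower()/strip(), then per index
-- emit the merged (sorted) partner indices
def find_similar_values_py_alt (value_distribution : List (String × Int)) : List (List (String × String)) :=
  let d := PySem.Dict.ofList value_distribution
  let values := d.keys
  let lower_groups := (PySem.List.enumerate values).foldl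
      (fun g p => g.modify (PySem.Str.lower p.2) [] (fun l => l ++ [p.1]))
      (PySem.Dict.empty : PySem.Dict String (List Int))
  let strip_groups := (PySem.List.enumerate values).foldl
      (fun g p => g.modify (PySem.Str.strip p.2) [] (fun l => l ++ [p.1]))
      (PySem.Dict.empty : PySem.Dict String (List Int))
  (PySem.List.enumerate values).foldl (fun mappings iv =>
    let i := iv.1
    let v1 := iv.2
    let lk := PySem.Str.lower v1
    let case_js := (lower_groups.getD lk []).filter (fun j => decide (j > i))
    let space_js := (strip_groups.getD (PySem.Str.strip v1) []).filter
        (fun j => decide (j > i) && (PySem.Str.lower (PySem.List.pyGetD values j "") != lk))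
    (PySem.List.sorted (case_js ++ space_js) (fun j => j)).foldl (fun mappings j =>
      let v2 := PySem.List.pyGetD values j ""
      if PySem.Str.lower v2 == lk then
        let standard := if d.getD v1 0 ≥ d.getD v2 0 then v1 else v2
        let non_standard := if standard == v1 then v2 else v1
        mappings ++ [[("from", non_standard), ("to", standard)]]
      else
        let standard := PySem.Str.strip v1
        mappings ++ [[("from", v1), ("to", standard)], [("from", v2), ("to", standard)]]) mappings) []

-- ===== PRECONDITION & SPEC =====
def Spec_find_similar_values_py (value_distribution : List (String × Int)) (out : List (List (String × String))) : Prop := out = find_similar_values_py_alt value_distribution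
instance (value_distribution : List (String × Int)) (out : List (List (String × String))) : Decidable (Spec_find_similar_values_py value_distribution out) := by unfold Spec_find_similar_values_py; infer_instance

-- ===== CLAIM (what is proved, stated in full; the proofs are below) =====
def Claim_equal_find_similar_values_py : Prop := ∀ (value_distribution : List (String × Int)), Dom_find_similar_values_py value_distribution → Spec_find_similar_values_py value_distribution (find_similar_values_py value_distribution)

-- ===== LEMMAS AND PROOFS =====


theorem pv_foldl_two_branch {α β : Type} (l : List α) (c1 c2 : α → Bool) (e1 e2 : α → List β) (acc : List β) :
    l.foldl (fun acc x => if c1 x then acc ++ e1 x else if c2 x then acc ++ e2 x else acc) acc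
      = acc ++ l.flatMap (fun x => if c1 x then e1 x else if c2 x then e2 x else []) := by
  have h : (fun (a : List β) x => if c1 x then a ++ e1 x else if c2 x then a ++ e2 x else a)
      = fun a x => a ++ (if c1 x then e1 x else if c2 x then e2 x else []) := by
    funext a x; split_ifs <;> simp
  rw [h, PySem.List.foldl_append_eq_flatMap]

theorem pv_foldl_one_branch {α β : Type} (l : List α) (c : α → Bool) (e1 e2 : α → List β) (acc : List β) :
    l.foldl (fun acc x => if c x then acc ++ e1 x else acc ++ e2 x) acc
      = acc ++ l.flatMap (fun x => if c x then e1 x else e2 x) := by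
  have h : (fun (a : List β) x => if c x then a ++ e1 x else a ++ e2 x)
      = fun a x => a ++ (if c x then e1 x else e2 x) := by
    funext a x; split_ifs <;> simp
  rw [h, PySem.List.foldl_append_eq_flatMap]

theorem pv_flatMap_filter {α β : Type} (l : List α) (p : α → Bool) (h : α → List β) :
    (l.filter p).flatMap h = l.flatMap (fun x => if p x then h x else []) := by
  induction l with
  | nil => simp
  | cons a t ih => by_cases hp : p a <;> simp [hp, ih]

theorem pv_filter_or_perm {α : Type} (l : List α) (p q : α → Bool) (h : ∀ x ∈ l, p x = true → q x = false) :
    (l.filter (fun x => p x || q x)).Perm (l.filter p ++ l.filter q) := by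
  induction l with
  | nil => simp
  | cons a t ih =>
    have ih' := ih (fun x hx => h x (List.mem_cons_of_mem a hx))
    by_cases hp : p a
    · have hq := h a (List.mem_cons_self) hp
      simpa [hp, hq] using ih'.cons a
    · by_cases hq : q a
      · simp only [hp, hq, List.filter_cons, Bool.false_or, if_pos, if_neg, Bool.not_eq_true]
        simpa [hp, hq] using (ih'.cons a).trans List.perm_middle.symm
      · simpa [hp, hq] using ih'

theorem pv_range_drop_prefix (m n : Int) (h0 : 0 ≤ m) (hmn : m ≤ n) (F : Int → Bool)
    (hF : ∀ j, 0 ≤ j → j < m → F j = false) :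
    (PySem.List.pyRange 0 n).filter F = (PySem.List.pyRange m n).filter F := by
  rw [PySem.List.pyRange_one_append 0 m n h0 hmn, List.filter_append]
  have hnil : (PySem.List.pyRange 0 m).filter F = [] :=
    List.filter_eq_nil_iff.2 (fun a ha => by
      have hm := PySem.List.mem_pyRange_one.1 ha
      simp [hF a hm.1 hm.2])
  rw [hnil, List.nil_append]

theorem pv_groups_getD (key : String → String) (values : List String) (c : String) :
    ((PySem.List.enumerate values).foldl
        (fun g p => g.modify (key p.2) [] (fun l => l ++ [p.1]))
        (PySem.Dict.empty : PySem.Dict String (List Int))).getD c []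
      = (PySem.List.pyRange 0 (PySem.List.len values)).filter
          (fun j => key (PySem.List.pyGetD values j "") == c) := by
  have hmap := List.foldl_map (f := fun p : Int × String => (key p.2, p.1))
    (g := fun (g : PySem.Dict String (List Int)) q => g.modify q.1 [] (fun l => l ++ [q.2]))
    (l := PySem.List.enumerate values) (init := (PySem.Dict.empty : PySem.Dict String (List Int)))
  simp only at hmap
  rw [← hmap, PySem.Dict.getD_foldl_modify_append, PySem.Dict.getD_empty, List.nil_append,
      List.filter_map, List.map_map]
  rw [PySem.List.enumerate_eq_map_pyRange values "", List.filter_map, List.map_map]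
  simp [Function.comp_def]

theorem pv_filter_and_gt {p : Int → Bool} (k n : Int) :
    (PySem.List.pyRange (k+1) n).filter (fun a => decide (a > k) && p a)
      = (PySem.List.pyRange (k+1) n).filter p :=
  List.filter_congr (fun x hx => by
    have h := PySem.List.mem_pyRange_one.1 hx
    have hgt : x > k := by omega
    simp [hgt])

theorem pv_filter_and_gt2 {p q : Int → Bool} (k n : Int) :
    (PySem.List.pyRange (k+1) n).filter (fun a => (decide (a > k) && q a) && p a)
      = (PySem.List.pyRange (k+1) n).filter (fun a => q a && p a) :=
  List.filter_congr (fun x hx => by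
    have h := PySem.List.mem_pyRange_one.1 hx
    have hgt : x > k := by omega
    simp [hgt])


theorem pv_range_gt_and (k n : Int) (hk0 : 0 ≤ k) (hkn : k < n) (p : Int → Bool) :
    (PySem.List.pyRange 0 n).filter (fun a => decide (a > k) && p a)
      = (PySem.List.pyRange (k+1) n).filter p := by
  have hpre : ∀ j, 0 ≤ j → j < k+1 → (fun a => decide (a > k) && p a) j = false := by
    intro j hj0 hjm; simp [show ¬ j > k by omega]
  rw [pv_range_drop_prefix (k+1) n (by omega) (by omega) _ hpre]
  exact pv_filter_and_gt k n

theorem pv_range_gt_and2 (k n : Int) (hk0 : 0 ≤ k) (hkn : k < n) (p q : Int → Bool) :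
    (PySem.List.pyRange 0 n).filter (fun a => (decide (a > k) && q a) && p a)
      = (PySem.List.pyRange (k+1) n).filter (fun a => q a && p a) := by
  have hpre : ∀ j, 0 ≤ j → j < k+1 → (fun a => (decide (a > k) && q a) && p a) j = false := by
    intro j hj0 hjm; simp [show ¬ j > k by omega]
  rw [pv_range_drop_prefix (k+1) n (by omega) (by omega) _ hpre]
  exact pv_filter_and_gt2 k n

-- ===== VERDICT (by name: the statement is the Claim_ definition above) =====
set_option maxHeartbeats 1000000 in
theorem find_similar_values_py_spec : Claim_equal_find_similar_values_py := by
  intro vd _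
  unfold Spec_find_similar_values_py
  simp only [find_similar_values_py, find_similar_values_py_alt]
  apply PySem.List.foldl_congr_mem
  intro acc iv hiv
  obtain ⟨k, hk, rfl⟩ := (PySem.List.mem_enumerate_iff _ _ _).1 hiv
  simp only [zero_add]
  have hnd : ((PySem.Dict.ofList vd).keys).Nodup := PySem.Dict.nodup_keys_ofList vd
  clear hiv
  generalize hg : (PySem.Dict.ofList vd).keys = vs at hnd hk ⊢
  have hlen : PySem.List.len vs = (vs.length : Int) := by simp [PySem.List.len]
  -- A side: slice = drop, drop = map of range, fold as flatMap
  have hslice : PySem.List.slice vs (some ((k:Int) + 1)) = vs.drop (k+1) := by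
    have hc : ((k:Int)+1) = ((k+1 : Nat) : Int) := by push_cast; ring
    rw [hc, PySem.List.slice_from_natCast]
  rw [hslice]
  have hdrop : vs.drop (k+1) = (PySem.List.pyRange ((k:Int)+1) (PySem.List.len vs)).map
      (fun j => PySem.List.pyGetD vs j "") := by
    have h := PySem.List.map_pyGetD_pyRange vs "" (a := ((k:Int)+1)) (by positivity)
    have ht : ((k:Int)+1).toNat = k+1 := by omega
    rw [ht] at h
    exact h.symm
  rw [hdrop, List.foldl_map]
  rw [pv_foldl_two_branch]
  -- B side: bucket lookups are filters of the index range
  rw [pv_groups_getD PySem.Str.lower, pv_groups_getD PySem.Str.strip]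
  rw [List.filter_filter, List.filter_filter]
  rw [pv_range_gt_and ((k:Int)) (PySem.List.len vs) (by positivity) (by rw [hlen]; exact_mod_cast hk),
      pv_range_gt_and2 ((k:Int)) (PySem.List.len vs) (by positivity) (by rw [hlen]; exact_mod_cast hk)]
  have hperm := pv_filter_or_perm (PySem.List.pyRange ((k:Int)+1) (PySem.List.len vs))
      (fun a => PySem.Str.lower (PySem.List.pyGetD vs a "") == PySem.Str.lower vs[k])
      (fun a => (PySem.Str.lower (PySem.List.pyGetD vs a "") != PySem.Str.lower vs[k]) &&
         (PySem.Str.strip (PySem.List.pyGetD vs a "") == PySem.Str.strip vs[k]))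
      (fun x hx hp => by simp [bne, hp])
  have hpw := (PySem.List.pairwise_lt_pyRange_one ((k:Int)+1) (PySem.List.len vs)).filter
      (fun a => (PySem.Str.lower (PySem.List.pyGetD vs a "") == PySem.Str.lower vs[k]) ||
        ((PySem.Str.lower (PySem.List.pyGetD vs a "") != PySem.Str.lower vs[k]) &&
         (PySem.Str.strip (PySem.List.pyGetD vs a "") == PySem.Str.strip vs[k])))
  rw [PySem.List.sorted_eq_of_perm_of_pairwise_lt _ _ _ hperm hpw]
  rw [pv_foldl_one_branch]
  congr 1
  rw [pv_flatMap_filter]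
  apply List.flatMap_congr
  intro j hj
  have hjr := PySem.List.mem_pyRange_one.1 hj
  have hjlen : j < (vs.length : Int) := by rw [hlen] at hjr; omega
  have hj0 : 0 ≤ j := by omega
  have hjn : j.toNat < vs.length := by omega
  have hget : PySem.List.pyGetD vs j "" = vs[j.toNat] := PySem.List.pyGetD_eq_getElem vs "" hj0 hjlen
  rw [hget]
  have hkj : k ≠ j.toNat := by omega
  have hne : vs[k] ≠ vs[j.toNat] := fun h => hkj (hnd.getElem_inj_iff.1 h)
  by_cases hL : PySem.Str.lower vs[j.toNat] = PySem.Str.lower vs[k]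
  · simp [hget, hL, hne, bne]
  · have hL' : PySem.Str.lower vs[k] ≠ PySem.Str.lower vs[j.toNat] := fun h => hL h.symm
    by_cases hS : PySem.Str.strip vs[j.toNat] = PySem.Str.strip vs[k]
    · simp [hget, hL, hL', hS, hne, bne]
    · have hS' : PySem.Str.strip vs[k] ≠ PySem.Str.strip vs[j.toNat] := fun h => hS h.symm
      simp [hget, hL, hL', hS, hS', bne]
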